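-- pv_equiv track=rewrite | github.com/Onnet-Consulting/forlife | addons/custom/forlife_report/wizard/report_num36.py | handle_data
-- ===== SOURCE A (Python) =====
-- def handle_data(data):
--     data_dict = {}
--     for d in data:
--         if d['lsx'] in data_dict:
--             data_dict[d['lsx']] += [d]
--         else:
--             data_dict[d['lsx']] = [d]
--     result = []
--     for key, values in data_dict.items():
--         count = 0
--         for v in values:
--             if key == v['lsx'] and count == 0:
--                 result += [v]
--             else:
--                 result += [{
--                     'lsx': '',
--                     'ql_donhang': '',
--                     'dv_giacong': '',
--                     'ma_thanhpham': v['ma_thanhpham'],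
--                     'dvt': v['dvt'],
--                     'sl_sanxuat': v['sl_sanxuat'],
--                     'sl_nhapkho': v['sl_nhapkho'],
--                     'sl_conlai': v['sl_conlai'],
--                 }]
--             count = 1
--     return result
-- ===== SOURCE B (Python) =====
-- def handle_data(data):
--     # index each distinct lsx by its first-appearance position
--     first = {}
--     for i, d in enumerate(data):
--         first.setdefault(d['lsx'], i)
--     # stable sort: rows sharing an lsx become contiguous, groups in first-appearance order
--     ordered = sorted(data, key=lambda d: first[d['lsx']])
--     result = []
--     seen = set()
--     for d in ordered:
--         k = d['lsx']
--         if k in seen: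
--             result.append({
--                 'lsx': '',
--                 'ql_donhang': '',
--                 'dv_giacong': '',
--                 'ma_thanhpham': d['ma_thanhpham'],
--                 'dvt': d['dvt'],
--                 'sl_sanxuat': d['sl_sanxuat'],
--                 'sl_nhapkho': d['sl_nhapkho'],
--                 'sl_conlai': d['sl_conlai'],
--             })
--         else:
--             result.append(d)
--             seen.add(k)
--     return result
-- ===== Notes on version B (the rewrite author's own statement) =====
-- stated objective: alternative
-- what changed: Replaces A's dict-of-lists bucketing plus nested group-emission loops by a first-appearance index, one stable sort keyed on it, and a single flattening pass with a seen-set that decides keep-vs-blank.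
import Mathlib
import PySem

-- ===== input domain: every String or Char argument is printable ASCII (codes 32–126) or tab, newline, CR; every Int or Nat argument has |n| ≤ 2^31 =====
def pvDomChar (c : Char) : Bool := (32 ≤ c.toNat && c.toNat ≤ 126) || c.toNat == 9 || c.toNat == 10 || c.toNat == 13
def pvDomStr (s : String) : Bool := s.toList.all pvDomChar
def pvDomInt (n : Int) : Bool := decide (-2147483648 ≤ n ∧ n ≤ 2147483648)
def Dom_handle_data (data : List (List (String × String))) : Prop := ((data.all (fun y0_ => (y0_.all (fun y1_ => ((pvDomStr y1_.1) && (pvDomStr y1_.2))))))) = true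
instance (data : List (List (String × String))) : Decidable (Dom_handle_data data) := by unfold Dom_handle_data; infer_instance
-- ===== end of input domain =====

-- B replaces A's dict-of-lists bucketing and nested emission loops by a first-appearance
-- index, one stable sort on it, and a single pass with a seen-set (objective: alternative).

-- ===== PORT A =====
-- d[k] for a row dict; total form of the Python subscript, exact under Pre_handle_data
def pvRget (d : List (String × String)) (k : String) : String :=
  (PySem.Dict.mk d).getD k ""

-- the blanked dict literal both Pythons build, in its key insertion order
def pvBlank (v : List (String × String)) : List (String × String) :=
  [("lsx", ""), ("ql_donhang", ""), ("dv_giacong", ""),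
   ("ma_thanhpham", pvRget v "ma_thanhpham"), ("dvt", pvRget v "dvt"),
   ("sl_sanxuat", pvRget v "sl_sanxuat"), ("sl_nhapkho", pvRget v "sl_nhapkho"),
   ("sl_conlai", pvRget v "sl_conlai")]

def handle_data (data : List (List (String × String))) : List (List (String × String)) :=
  let data_dict : PySem.Dict String (List (List (String × String))) :=
    data.foldl (fun dd d =>
      if dd.contains (pvRget d "lsx") then
        dd.insert (pvRget d "lsx") (dd.getD (pvRget d "lsx") [] ++ [d])
      else
        dd.insert (pvRget d "lsx") [d]) PySem.Dict.empty
  (data_dict.items.foldl (fun result kv =>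
    (kv.2.foldl (fun (p : List (List (String × String)) × Int) v =>
      if kv.1 == pvRget v "lsx" && p.2 == 0 then (p.1 ++ [v], 1) else (p.1 ++ [pvBlank v], 1))
      (result, 0)).1) [])

-- ===== PORT B =====
def handle_data_alt (data : List (List (String × String))) : List (List (String × String)) :=
  let first : PySem.Dict String Int :=
    (PySem.List.enumerate data).foldl (fun f p => f.setdefault (pvRget p.2 "lsx") p.1)
      PySem.Dict.empty
  let ordered := PySem.List.sorted data (fun d => first.getD (pvRget d "lsx") 0)
  (ordered.foldl (fun (p : List (List (String × String)) × PySem.Set String) d =>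
    if p.2.contains (pvRget d "lsx") then (p.1 ++ [pvBlank d], p.2)
    else (p.1 ++ [d], p.2.add (pvRget d "lsx"))) ([], PySem.Set.empty)).1

-- ===== PRECONDITION & SPEC =====
-- Pre_ excludes exactly the inputs on which the Python raises KeyError: a row without the
-- key 'lsx', or a row that repeats an earlier row's lsx but lacks one of the five copied
-- fields (both A and B raise there).
def Pre_handle_data (data : List (List (String × String))) : Prop :=
  ∀ p ∈ data.zipIdx, (PySem.Dict.mk p.1).contains "lsx" = true ∧
    (((data.take p.2).any (fun e => pvRget e "lsx" == pvRget p.1 "lsx")) = true →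
      ∀ k ∈ ["ma_thanhpham", "dvt", "sl_sanxuat", "sl_nhapkho", "sl_conlai"],
        (PySem.Dict.mk p.1).contains k = true)
instance (data : List (List (String × String))) : Decidable (Pre_handle_data data) := by
  unfold Pre_handle_data; infer_instance

def pvWitness_handle_data : (List (List (String × String))) :=
  [[("lsx", "a"), ("ql_donhang", "q"), ("dv_giacong", "g"), ("ma_thanhpham", "m"),
    ("dvt", "c"), ("sl_sanxuat", "1"), ("sl_nhapkho", "2"), ("sl_conlai", "3")],
   [("lsx", "a"), ("ql_donhang", "q"), ("dv_giacong", "g"), ("ma_thanhpham", "m2"),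
    ("dvt", "c"), ("sl_sanxuat", "4"), ("sl_nhapkho", "5"), ("sl_conlai", "6")]]

def Spec_handle_data (data : List (List (String × String))) (out : List (List (String × String))) : Prop := out = handle_data_alt data
instance (data : List (List (String × String))) (out : List (List (String × String))) : Decidable (Spec_handle_data data out) := by unfold Spec_handle_data; infer_instance

-- ===== CLAIM (what is proved, stated in full; the proofs are below) =====
def Claim_equal_handle_data : Prop := ∀ (data : List (List (String × String))), Dom_handle_data data → Pre_handle_data data → Spec_handle_data data (handle_data data)

-- ===== LEMMAS AND PROOFS =====

-- the row's group key
def pvLsx (d : List (String × String)) : String := pvRget d "lsx"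

-- the distinct keys in first-appearance order
def pvKeys (data : List (List (String × String))) : List String :=
  PySem.List.dedup (data.map pvLsx)

-- the rows of one group, in original order
def pvGrp (data : List (List (String × String))) (k : String) : List (List (String × String)) :=
  data.filter (fun d => pvLsx d == k)

-- one emitted group: first row kept, the rest blanked
def pvProc (data : List (List (String × String))) (k : String) : List (List (String × String)) :=
  match pvGrp data k with
  | [] => []
  | v :: vs => v :: vs.map pvBlank

-- the common canonical result both ports are proved equal to
def pvCanon (data : List (List (String × String))) : List (List (String × String)) :=
  (pvKeys data).flatMap (pvProc data)

theorem pvGrp_append (xs : List (List (String × String))) (x : List (String × String)) (k : String) :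
    pvGrp (xs ++ [x]) k = pvGrp xs k ++ (if pvLsx x == k then [x] else []) := by
  simp only [pvGrp, List.filter_append]
  by_cases h : pvLsx x = k <;> simp [h]

theorem pvKeys_append (xs : List (List (String × String))) (x : List (String × String)) :
    pvKeys (xs ++ [x]) = if pvLsx x ∈ pvKeys xs then pvKeys xs else pvKeys xs ++ [pvLsx x] := by
  simp only [pvKeys, List.map_append, List.map_cons, List.map_nil, PySem.List.dedup_eq_ofList,
    PySem.Set.ofList_append_singleton]
  rw [PySem.Set.add_eq_ite]

theorem pvGrp_ne_nil {data : List (List (String × String))} {k : String} (h : k ∈ pvKeys data) :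
    pvGrp data k ≠ [] := by
  rw [pvKeys, PySem.List.mem_dedup, List.mem_map] at h
  obtain ⟨d, hd, hk⟩ := h
  intro hnil
  have : d ∈ pvGrp data k := by
    simp [pvGrp, List.mem_filter, hd, hk]
  simp [hnil] at this

theorem pvLsx_of_mem_grp {data : List (List (String × String))} {k : String}
    {d : List (String × String)} (h : d ∈ pvGrp data k) : pvLsx d = k := by
  rw [pvGrp, List.mem_filter] at h
  exact beq_iff_eq.mp h.2

-- ---------- A side ----------

def pvBuildA (data : List (List (String × String))) : PySem.Dict String (List (List (String × String))) :=
  data.foldl (fun dd d =>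
    if dd.contains (pvRget d "lsx") then
      dd.insert (pvRget d "lsx") (dd.getD (pvRget d "lsx") [] ++ [d])
    else
      dd.insert (pvRget d "lsx") [d]) PySem.Dict.empty

theorem pvBuildA_items (data : List (List (String × String))) :
    (pvBuildA data).items = (pvKeys data).map (fun k => (k, pvGrp data k)) := by
  induction data using List.reverseRecOn with
  | nil => rfl
  | append_singleton xs x ih =>
    have hb : pvBuildA (xs ++ [x]) =
        if (pvBuildA xs).contains (pvLsx x) then
          (pvBuildA xs).insert (pvLsx x) ((pvBuildA xs).getD (pvLsx x) [] ++ [x])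
        else (pvBuildA xs).insert (pvLsx x) [x] := by
      rw [pvBuildA, List.foldl_append]; rfl
    have hkeys : (pvBuildA xs).keys = pvKeys xs := by
      rw [PySem.Dict.keys, ih, List.map_map]; simp [Function.comp_def]
    have hnd : (pvBuildA xs).keys.Nodup := by
      rw [hkeys]; exact PySem.List.nodup_dedup _
    have hcont : (pvBuildA xs).contains (pvLsx x) = true ↔ pvLsx x ∈ pvKeys xs := by
      rw [PySem.Dict.contains_iff_mem_keys, hkeys]
    by_cases hmem : pvLsx x ∈ pvKeys xs
    · have hc : (pvBuildA xs).contains (pvLsx x) = true := hcont.mpr hmem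
      have hg : (pvBuildA xs).getD (pvLsx x) [] = pvGrp xs (pvLsx x) := by
        apply PySem.Dict.getD_of_mem_items _ _ hnd
        rw [ih, List.mem_map]
        exact ⟨pvLsx x, hmem, rfl⟩
      rw [hb, if_pos hc, PySem.Dict.items_insert_of_contains _ _ hc, ih, hg,
        pvKeys_append, if_pos hmem, List.map_map]
      apply List.map_congr_left
      intro k hk
      by_cases hkk : k = pvLsx x
      · subst hkk; simp [pvGrp_append]
      · have : pvLsx x ≠ k := fun h => hkk h.symm
        simp [pvGrp_append, hkk, this]
    · have hc : (pvBuildA xs).contains (pvLsx x) = false :=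
        Bool.eq_false_iff.mpr (fun h => hmem (hcont.mp h))
      have hg0 : pvGrp xs (pvLsx x) = [] := by
        rw [pvGrp, List.filter_eq_nil_iff]
        intro d hd hbe
        exact hmem (by
          rw [pvKeys, PySem.List.mem_dedup, List.mem_map]
          exact ⟨d, hd, beq_iff_eq.mp hbe⟩)
      rw [hb, if_neg (by simp [hc]), PySem.Dict.items_insert_of_not_contains _ _ hc, ih,
        pvKeys_append, if_neg hmem, List.map_append]
      congr 1
      · apply List.map_congr_left
        intro k hk
        have hkk : pvLsx x ≠ k := fun h => hmem (h ▸ hk)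
        simp [pvGrp_append, hkk]
      · simp [pvGrp_append, hg0]

theorem pvInnerA_one (k : String) (vs : List (List (String × String)))
    (res : List (List (String × String))) :
    vs.foldl (fun (p : List (List (String × String)) × Int) v =>
      if k == pvRget v "lsx" && p.2 == 0 then (p.1 ++ [v], 1) else (p.1 ++ [pvBlank v], 1))
      (res, 1) = (res ++ vs.map pvBlank, 1) := by
  induction vs generalizing res with
  | nil => simp
  | cons v vs ih =>
    rw [List.foldl_cons, if_neg (by simp), ih]
    simp

theorem pvA_canon (data : List (List (String × String))) : handle_data data = pvCanon data := by
  show ((pvBuildA data).items.foldl (fun result kv =>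
    (kv.2.foldl (fun (p : List (List (String × String)) × Int) v =>
      if kv.1 == pvRget v "lsx" && p.2 == 0 then (p.1 ++ [v], 1) else (p.1 ++ [pvBlank v], 1))
      (result, 0)).1) []) = pvCanon data
  rw [pvBuildA_items, List.foldl_map]
  rw [PySem.List.foldl_congr_mem (pvKeys data) _ (fun acc k => acc ++ pvProc data k) [] ?h]
  case h =>
    intro res k hk
    obtain ⟨v, vs, hvv⟩ : ∃ v vs, pvGrp data k = v :: vs := by
      cases h : pvGrp data k with
      | nil => exact absurd h (pvGrp_ne_nil hk)
      | cons v vs => exact ⟨v, vs, rfl⟩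
    have hv : pvRget v "lsx" = k :=
      pvLsx_of_mem_grp (data := data) (k := k) (hvv ▸ List.mem_cons_self)
    simp only [hvv, List.foldl_cons]
    rw [if_pos (by simp [hv])]
    rw [pvInnerA_one]
    simp [pvProc, hvv]
  rw [PySem.List.foldl_append_eq_flatMap]
  rfl

-- ---------- B side ----------

def pvFD (data : List (List (String × String))) : PySem.Dict String Int :=
  (PySem.List.enumerate data).foldl (fun f p => f.setdefault (pvRget p.2 "lsx") p.1)
    PySem.Dict.empty

theorem pvGrp_nil_of_not_mem {data : List (List (String × String))} {k : String}
    (h : k ∉ pvKeys data) : pvGrp data k = [] := by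
  rw [pvGrp, List.filter_eq_nil_iff]
  intro d hd hbe
  exact h (by
    rw [pvKeys, PySem.List.mem_dedup, List.mem_map]
    exact ⟨d, hd, beq_iff_eq.mp hbe⟩)

theorem pvFlatMap_congr_mem {α β : Type} {l : List α} {f g : α → List β}
    (h : ∀ a ∈ l, f a = g a) : l.flatMap f = l.flatMap g := by
  rw [List.flatMap_def, List.flatMap_def, List.map_congr_left h]

theorem pvFD_items (data : List (List (String × String))) :
    (pvFD data).items = (pvKeys data).map (fun k => (k, ((data.map pvLsx).idxOf k : Int))) := by
  induction data using List.reverseRecOn with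
  | nil => rfl
  | append_singleton xs x ih =>
    have hb : pvFD (xs ++ [x]) = (pvFD xs).setdefault (pvLsx x) ((xs.length : Int)) := by
      rw [pvFD, PySem.List.enumerate_append, List.foldl_append]
      simp [pvFD, PySem.List.enumerate_cons, PySem.List.enumerate_nil]
      rfl
    have hkeys : (pvFD xs).keys = pvKeys xs := by
      rw [PySem.Dict.keys, ih, List.map_map]; simp [Function.comp_def]
    have hcont : (pvFD xs).contains (pvLsx x) = true ↔ pvLsx x ∈ pvKeys xs := by
      rw [PySem.Dict.contains_iff_mem_keys, hkeys]
    have hmapmem : ∀ k, k ∈ pvKeys xs → k ∈ xs.map pvLsx := by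
      intro k hk; rwa [pvKeys, PySem.List.mem_dedup] at hk
    by_cases hmem : pvLsx x ∈ pvKeys xs
    · have hc : (pvFD xs).contains (pvLsx x) = true := hcont.mpr hmem
      rw [hb, PySem.Dict.setdefault, if_pos hc, ih, pvKeys_append, if_pos hmem]
      apply List.map_congr_left
      intro k hk
      rw [List.map_append, List.map_cons, List.map_nil, List.idxOf_append,
        if_pos (hmapmem k hk)]
    · have hc : (pvFD xs).contains (pvLsx x) = false :=
        Bool.eq_false_iff.mpr (fun h => hmem (hcont.mp h))
      rw [hb, PySem.Dict.setdefault, if_neg (by simp [hc]), pvKeys_append, if_neg hmem,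
        List.map_append]
      show (pvFD xs).items ++ [(pvLsx x, (xs.length : Int))] = _
      rw [ih]
      congr 1
      · apply List.map_congr_left
        intro k hk
        rw [List.map_append, List.map_cons, List.map_nil, List.idxOf_append,
          if_pos (hmapmem k hk)]
      · have hx : pvLsx x ∉ xs.map pvLsx := by
          intro h; exact hmem (by rw [pvKeys, PySem.List.mem_dedup]; exact h)
        rw [List.map_cons, List.map_nil, List.map_append, List.map_cons, List.map_nil,
          List.idxOf_append, if_neg hx]
        simp

theorem pvKeys_idx_pairwise (data : List (List (String × String))) :
    (pvKeys data).Pairwise (fun a b => (data.map pvLsx).idxOf a < (data.map pvLsx).idxOf b) := by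
  induction data using List.reverseRecOn with
  | nil => simp [pvKeys, PySem.List.dedup]
  | append_singleton xs x ih =>
    have hidx : ∀ k ∈ pvKeys xs, ((xs ++ [x]).map pvLsx).idxOf k = (xs.map pvLsx).idxOf k := by
      intro k hk
      rw [List.map_append, List.idxOf_append,
        if_pos (by rwa [pvKeys, PySem.List.mem_dedup] at hk)]
    have hlt : ∀ k ∈ pvKeys xs, (xs.map pvLsx).idxOf k < xs.length := by
      intro k hk
      have := List.idxOf_lt_length_iff.mpr (show k ∈ xs.map pvLsx by
        rwa [pvKeys, PySem.List.mem_dedup] at hk)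
      simpa using this
    rw [pvKeys_append]
    by_cases hmem : pvLsx x ∈ pvKeys xs
    · rw [if_pos hmem]
      exact ih.imp_of_mem (fun ha hb hr => by rw [hidx _ ha, hidx _ hb]; exact hr)
    · rw [if_neg hmem, List.pairwise_append]
      refine ⟨ih.imp_of_mem (fun ha hb hr => by rw [hidx _ ha, hidx _ hb]; exact hr),
        List.pairwise_singleton _ _, ?_⟩
      intro a ha b hb
      rw [List.mem_singleton] at hb
      subst hb
      have hx : pvLsx x ∉ xs.map pvLsx := by
        intro h; exact hmem (by rw [pvKeys, PySem.List.mem_dedup]; exact h)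
      rw [hidx _ ha, List.map_append, List.idxOf_append, if_neg hx]
      have : (xs.map pvLsx).length = xs.length := by simp
      have h2 := hlt a ha
      omega

theorem pvInsertBy_cons {α : Type} (bef : α → α → Bool) (x y : α) (ys : List α) :
    PySem.List.insertBy bef x (y :: ys) =
      if bef x y then x :: y :: ys else y :: PySem.List.insertBy bef x ys := by
  simp [PySem.List.insertBy]

theorem pvInsertBy_split {α : Type} (bef : α → α → Bool) (x : α) (ys1 ys2 : List α)
    (h1 : ∀ y ∈ ys1, bef x y = false) (h2 : ∀ y ∈ ys2, bef x y = true) :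
    PySem.List.insertBy bef x (ys1 ++ ys2) = ys1 ++ x :: ys2 := by
  induction ys1 with
  | nil =>
    cases ys2 with
    | nil => simp [PySem.List.insertBy]
    | cons z zs => simp [pvInsertBy_cons, h2 z (by simp)]
  | cons y ys ih =>
    rw [List.cons_append, pvInsertBy_cons, h1 y (by simp)]
    simp only [Bool.false_eq_true, if_false, List.cons_append, List.cons.injEq, true_and]
    exact ih (fun y hy => h1 y (by simp [hy]))

theorem pvSort_flat (g : String → Int) (data : List (List (String × String)))
    (hp : ((pvKeys data).map g).Pairwise (· < ·)) :
    PySem.List.sorted data (fun d => g (pvLsx d)) = (pvKeys data).flatMap (pvGrp data) := by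
  rw [PySem.List.sorted_eq_foldl_insertBy]
  induction data using List.reverseRecOn with
  | nil => simp [pvKeys, PySem.List.dedup]
  | append_singleton xs x ih =>
    have hpx : ((pvKeys xs).map g).Pairwise (· < ·) := by
      rw [pvKeys_append] at hp
      by_cases hmem : pvLsx x ∈ pvKeys xs
      · rwa [if_pos hmem] at hp
      · rw [if_neg hmem, List.map_append] at hp
        exact (List.pairwise_append.mp hp).1
    rw [List.foldl_append, List.foldl_cons, List.foldl_nil, ih hpx]
    by_cases hmem : pvLsx x ∈ pvKeys xs
    · obtain ⟨K1, K2, hsplit⟩ := List.append_of_mem hmem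
      have hnd : (pvKeys xs).Nodup := PySem.List.nodup_dedup _
      rw [hsplit] at hnd
      have hk0K1 : pvLsx x ∉ K1 := by
        intro h
        exact (List.disjoint_of_nodup_append hnd) h List.mem_cons_self
      have hk0K2 : pvLsx x ∉ K2 := by
        have := (List.nodup_append.mp hnd).2.1
        exact (List.nodup_cons.mp this).1
      have hg : (K1 ++ pvLsx x :: K2).Pairwise (fun a b => g a < g b) := by
        have := hp
        rw [pvKeys_append, if_pos hmem, hsplit] at this
        exact (List.pairwise_map.mp this)
      have hgK1 : ∀ k ∈ K1, g k < g (pvLsx x) :=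
        fun k hk => (List.pairwise_append.mp hg).2.2 k hk _ List.mem_cons_self
      have hgK2 : ∀ k ∈ K2, g (pvLsx x) < g k := by
        have := (List.pairwise_append.mp hg).2.1
        exact (List.pairwise_cons.mp this).1
      rw [hsplit, List.flatMap_append, List.flatMap_cons]
      rw [show (K1.flatMap (pvGrp xs) ++ (pvGrp xs (pvLsx x) ++ K2.flatMap (pvGrp xs))) =
        ((K1.flatMap (pvGrp xs) ++ pvGrp xs (pvLsx x)) ++ K2.flatMap (pvGrp xs)) by
          rw [List.append_assoc]]
      rw [pvInsertBy_split _ _ _ _ ?h1 ?h2]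
      case h1 =>
        intro y hy
        rw [List.mem_append] at hy
        have hle : ¬ g (pvLsx x) < g (pvLsx y) := by
          rcases hy with hy | hy
          · obtain ⟨k, hk, hyk⟩ := List.mem_flatMap.mp hy
            rw [pvLsx_of_mem_grp hyk]
            exact not_lt_of_gt (hgK1 k hk)
          · rw [pvLsx_of_mem_grp hy]
            exact lt_irrefl _
        simpa using hle
      case h2 =>
        intro y hy
        obtain ⟨k, hk, hyk⟩ := List.mem_flatMap.mp hy
        rw [pvLsx_of_mem_grp hyk]
        simpa using hgK2 k hk
      rw [pvKeys_append, if_pos hmem, hsplit, List.flatMap_append, List.flatMap_cons]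
      rw [pvFlatMap_congr_mem (l := K1) (f := pvGrp (xs ++ [x])) (g := pvGrp xs) ?c1,
        pvFlatMap_congr_mem (l := K2) (f := pvGrp (xs ++ [x])) (g := pvGrp xs) ?c2]
      case c1 =>
        intro k hk
        rw [pvGrp_append, if_neg (by simp; intro h; exact hk0K1 (h ▸ hk)), List.append_nil]
      case c2 =>
        intro k hk
        rw [pvGrp_append, if_neg (by simp; intro h; exact hk0K2 (h ▸ hk)), List.append_nil]
      rw [pvGrp_append, if_pos (by simp)]
      simp
    · have hgK : ∀ k ∈ pvKeys xs, g k < g (pvLsx x) := by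
        have := hp
        rw [pvKeys_append, if_neg hmem] at this
        have := List.pairwise_map.mp this
        intro k hk
        exact (List.pairwise_append.mp this).2.2 k hk _ List.mem_cons_self
      rw [PySem.List.insertBy_of_forall_not_before _ _ _ ?hall]
      case hall =>
        intro y hy
        obtain ⟨k, hk, hyk⟩ := List.mem_flatMap.mp hy
        rw [pvLsx_of_mem_grp hyk]
        simpa using not_lt_of_gt (hgK k hk)
      rw [pvKeys_append, if_neg hmem, List.flatMap_append, List.flatMap_cons,
        List.flatMap_nil]
      rw [pvFlatMap_congr_mem (l := pvKeys xs) (f := pvGrp (xs ++ [x])) (g := pvGrp xs) ?c3]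
      case c3 =>
        intro k hk
        rw [pvGrp_append, if_neg (by simp; intro h; exact hmem (h ▸ hk)), List.append_nil]
      rw [pvGrp_append, if_pos (by simp), pvGrp_nil_of_not_mem hmem]
      simp

theorem pvSeen_blank (k : String) (vs : List (List (String × String)))
    (res : List (List (String × String))) (s : PySem.Set String)
    (hall : ∀ v ∈ vs, pvLsx v = k) (hk : k ∈ s) :
    vs.foldl (fun (p : List (List (String × String)) × PySem.Set String) d =>
        if p.2.contains (pvRget d "lsx") then (p.1 ++ [pvBlank d], p.2)
        else (p.1 ++ [d], p.2.add (pvRget d "lsx"))) (res, s)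
      = (res ++ vs.map pvBlank, s) := by
  induction vs generalizing res with
  | nil => simp
  | cons v vs ih =>
    have hv : pvRget v "lsx" = k := hall v (by simp)
    have : s.contains (pvRget v "lsx") = true := by
      rw [PySem.Set.contains_iff, hv]; exact hk
    simp only [List.foldl_cons, this, if_true]
    rw [ih _ (fun v hv => hall v (by simp [hv]))]
    simp

theorem pvSeen_flat (data : List (List (String × String))) (Ks : List String)
    (res : List (List (String × String))) (s : PySem.Set String)
    (hnd : Ks.Nodup) (hdis : ∀ k ∈ Ks, k ∉ s) (hne : ∀ k ∈ Ks, pvGrp data k ≠ []) :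
    (Ks.flatMap (pvGrp data)).foldl (fun (p : List (List (String × String)) × PySem.Set String) d =>
        if p.2.contains (pvRget d "lsx") then (p.1 ++ [pvBlank d], p.2)
        else (p.1 ++ [d], p.2.add (pvRget d "lsx"))) (res, s)
      = (res ++ Ks.flatMap (pvProc data), s.update Ks) := by
  induction Ks generalizing res s with
  | nil => simp [PySem.Set.update]
  | cons k Ks ih =>
    obtain ⟨v, vs, hvv⟩ : ∃ v vs, pvGrp data k = v :: vs := by
      cases h : pvGrp data k with
      | nil => exact absurd h (hne k List.mem_cons_self)
      | cons v vs => exact ⟨v, vs, rfl⟩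
    have hv : pvRget v "lsx" = k :=
      pvLsx_of_mem_grp (data := data) (k := k) (hvv ▸ List.mem_cons_self)
    have hks : k ∉ s := hdis k List.mem_cons_self
    rw [List.flatMap_cons, List.foldl_append, hvv, List.foldl_cons]
    rw [if_neg (by
      simp only [hv]
      intro h
      exact hks ((PySem.Set.contains_iff _ _).mp h))]
    rw [hv]
    rw [pvSeen_blank k vs _ (s.add k)
      (fun w hw => pvLsx_of_mem_grp (hvv ▸ List.mem_cons_of_mem v hw))
      ((PySem.Set.mem_add s k k).mpr (Or.inr rfl))]
    rw [ih _ (s.add k) (List.nodup_cons.mp hnd).2 ?dis (fun k' hk' => hne k' (List.mem_cons_of_mem _ hk'))]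
    case dis =>
      intro k' hk' hmem
      rcases (PySem.Set.mem_add s k k').mp hmem with h | h
      · exact hdis k' (List.mem_cons_of_mem _ hk') h
      · exact (List.nodup_cons.mp hnd).1 (h ▸ hk')
    rw [PySem.Set.update_cons]
    have hproc : pvProc data k = v :: vs.map pvBlank := by
      rw [pvProc, hvv]
    rw [List.flatMap_cons, hproc]
    simp

theorem pvB_canon (data : List (List (String × String))) : handle_data_alt data = pvCanon data := by
  show ((PySem.List.sorted data (fun d => (pvFD data).getD (pvRget d "lsx") 0)).foldl
    (fun (p : List (List (String × String)) × PySem.Set String) d =>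
      if p.2.contains (pvRget d "lsx") then (p.1 ++ [pvBlank d], p.2)
      else (p.1 ++ [d], p.2.add (pvRget d "lsx"))) ([], PySem.Set.empty)).1 = pvCanon data
  have hnd : (pvFD data).keys.Nodup := by
    rw [PySem.Dict.keys, pvFD_items, List.map_map]
    have h0 : (pvKeys data).Nodup := by rw [pvKeys]; exact PySem.List.nodup_dedup _
    simpa [Function.comp_def] using h0
  have hg : ∀ k ∈ pvKeys data, (pvFD data).getD k 0 = ((data.map pvLsx).idxOf k : Int) := by
    intro k hk
    apply PySem.Dict.getD_of_mem_items _ _ hnd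
    rw [pvFD_items, List.mem_map]
    exact ⟨k, hk, rfl⟩
  have hp : ((pvKeys data).map (fun k => (pvFD data).getD k 0)).Pairwise (· < ·) := by
    rw [List.pairwise_map]
    exact (pvKeys_idx_pairwise data).imp_of_mem (fun ha hb hr => by
      rw [hg _ ha, hg _ hb]; exact_mod_cast hr)
  rw [show (fun d => (pvFD data).getD (pvRget d "lsx") 0) =
      (fun d => (fun k => (pvFD data).getD k 0) (pvLsx d)) from rfl]
  rw [pvSort_flat _ data hp]
  rw [pvSeen_flat data (pvKeys data) [] PySem.Set.empty (by rw [pvKeys]; exact PySem.List.nodup_dedup _)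
    (by intro k _ h; simp [PySem.Set.empty] at h) (fun k hk => pvGrp_ne_nil hk)]
  rfl

-- ===== VERDICT (by name: the statement is the Claim_ definition above) =====
theorem handle_data_spec : Claim_equal_handle_data := by
  intro data _ _
  unfold Spec_handle_data
  rw [pvA_canon, pvB_canon]
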